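-- pv_equiv track=rewrite | github.com/michaelbaron1/math_games | year_game.py | jf_pipeline
-- ===== SOURCE A (Python) =====
-- def jf_pipeline(month, day, year):
--     counter = 0
--     for i in range(401,year+1):
--
--         if (str(i-1)[-2:]) == "00":
--             if (i-1)%400 == 0:
--                 counter += 2
--             else:
--                 counter += 1
--         else:
--             if (i-1)%4 == 0:
--                 counter +=2
--             else:
--                 counter +=1
--     counter += day%7
--     return counter
-- ===== SOURCE B (Python) =====
-- def jf_pipeline(month, day, year):
--     c = day % 7
--     if year >= 401:
--         n = year - 1
--         c += (year - 400) + (n // 4 - n // 100 + n // 400 - 96)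
--     return c
-- ===== Notes on version B (the rewrite author's own statement) =====
-- stated objective: faster
-- what changed: Replaced the per-year loop with string-based century test by a closed-form count: (year-400) common increments plus the Gregorian leap-year count n//4 - n//100 + n//400 - 96 for n = year-1.
import Mathlib
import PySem

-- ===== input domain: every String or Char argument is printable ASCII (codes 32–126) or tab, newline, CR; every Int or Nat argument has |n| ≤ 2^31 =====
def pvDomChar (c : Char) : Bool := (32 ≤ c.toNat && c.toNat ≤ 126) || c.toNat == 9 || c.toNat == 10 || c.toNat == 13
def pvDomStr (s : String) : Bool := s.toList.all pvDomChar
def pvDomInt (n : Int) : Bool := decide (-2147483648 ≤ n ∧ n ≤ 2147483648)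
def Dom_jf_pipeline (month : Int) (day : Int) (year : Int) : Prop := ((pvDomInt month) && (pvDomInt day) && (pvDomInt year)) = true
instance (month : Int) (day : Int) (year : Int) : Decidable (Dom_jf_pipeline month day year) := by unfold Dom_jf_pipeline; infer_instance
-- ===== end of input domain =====

-- B replaces A's O(year) loop (with its per-year string test for centuries) by the
-- closed-form Gregorian leap-count formula, an O(1) computation.

-- ===== PORT A =====
-- str(i-1)[-2:] == "00" is ported on the char-list level: PySem.Int.toChars = str(n)'s characters,
-- PySem.List.slice … (some (-2)) none = s[-2:]; comparison with "00" is comparison with ['0','0'].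
def jf_pipeline (month : Int) (day : Int) (year : Int) : Int :=
  let counter : Int := 0
  let counter := (PySem.List.pyRange 401 (year + 1) 1).foldl
    (fun counter i =>
      if PySem.List.slice (PySem.Int.toChars (i - 1)) (some (-2)) none = ['0', '0'] then
        if PySem.Int.mod (i - 1) 400 = 0 then counter + 2 else counter + 1
      else
        if PySem.Int.mod (i - 1) 4 = 0 then counter + 2 else counter + 1)
    counter
  counter + PySem.Int.mod day 7

-- ===== PORT B =====
def jf_pipeline_alt (month : Int) (day : Int) (year : Int) : Int :=
  let c := PySem.Int.mod day 7
  if 401 ≤ year then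
    let n := year - 1
    c + (year - 400) +
      (PySem.Int.floordiv n 4 - PySem.Int.floordiv n 100 + PySem.Int.floordiv n 400 - 96)
  else c

-- ===== PRECONDITION & SPEC =====
def Spec_jf_pipeline (month : Int) (day : Int) (year : Int) (out : Int) : Prop := out = jf_pipeline_alt month day year
instance (month : Int) (day : Int) (year : Int) (out : Int) : Decidable (Spec_jf_pipeline month day year out) := by unfold Spec_jf_pipeline; infer_instance

-- ===== CLAIM (what is proved, stated in full; the proofs are below) =====
def Claim_equal_jf_pipeline : Prop := ∀ (month : Int) (day : Int) (year : Int), Dom_jf_pipeline month day year → Spec_jf_pipeline month day year (jf_pipeline month day year)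

-- ===== LEMMAS AND PROOFS =====

-- accumulator law of Nat.toDigitsCore
lemma toDigitsCore_acc (b : Nat) : ∀ (f n : Nat) (l : List Char),
    Nat.toDigitsCore b f n l = Nat.toDigitsCore b f n [] ++ l := by
  intro f
  induction f with
  | zero => intro n l; simp [Nat.toDigitsCore]
  | succ f ih =>
    intro n l
    simp only [Nat.toDigitsCore]
    by_cases h : n / b = 0
    · simp [h]
    · simp only [h, if_false]
      rw [ih (n / b) ((n % b).digitChar :: l), ih (n / b) [(n % b).digitChar]]
      simp

-- one unfolding step of Nat.toDigitsCore when the quotient is nonzero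
lemma toDigitsCore_step (b f n : Nat) (h : n / b ≠ 0) (l : List Char) :
    Nat.toDigitsCore b (f + 1) n l = Nat.toDigitsCore b f (n / b) ((n % b).digitChar :: l) := by
  simp [Nat.toDigitsCore, h]

-- for n ≥ 100 the decimal string of n ends with the digits of (n/10 % 10) and (n % 10)
lemma toDigits_last_two (n : Nat) (h : 100 ≤ n) :
    Nat.toDigits 10 n
      = Nat.toDigitsCore 10 (n - 1) (n / 100) [] ++ [(n / 10 % 10).digitChar, (n % 10).digitChar] := by
  obtain ⟨k, rfl⟩ : ∃ k, n = k + 100 := ⟨n - 100, by omega⟩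
  have h1 : (k + 100) / 10 ≠ 0 := by omega
  have h2 : (k + 100) / 10 / 10 ≠ 0 := by omega
  have h3 : (k + 100) / 10 / 10 = (k + 100) / 100 := by omega
  simp only [Nat.toDigits]
  rw [toDigitsCore_step 10 (k + 100) (k + 100) h1 []]
  rw [show k + 100 = (k + 99) + 1 by omega]
  rw [toDigitsCore_step 10 (k + 99) ((k + 99 + 1) / 10) (by omega) _]
  rw [toDigitsCore_acc]
  have h3' : (k + 99 + 1) / 10 / 10 = (k + 99 + 1) / 100 := by omega
  rw [h3']
  simp [show k + 99 + 1 - 1 = k + 99 from rfl]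

lemma digitChar_eq_zero (k : Nat) (h : k < 10) : k.digitChar = '0' ↔ k = 0 := by
  interval_cases k <;> simp [Nat.digitChar]

-- 'str(m)[-2:] == "00"' is exactly divisibility by 100, for m ≥ 100
lemma cond_iff (m : Int) (hm : 100 ≤ m) :
    (PySem.List.slice (PySem.Int.toChars m) (some (-2)) none = ['0', '0']) ↔ (100 : Int) ∣ m := by
  have hm0 : ¬ m < 0 := by omega
  have hN : 100 ≤ m.toNat := by omega
  rw [show PySem.Int.toChars m = Nat.toDigits 10 m.toNat by simp [PySem.Int.toChars, hm0]]
  rw [PySem.List.slice_from_neg_ofNat _ 2 (by omega)]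
  rw [toDigits_last_two m.toNat hN]
  rw [List.length_append]
  simp only [List.length_cons, List.length_nil]
  rw [show (Nat.toDigitsCore 10 (m.toNat - 1) (m.toNat / 100) []).length + (0 + 1 + 1) - 2
        = (Nat.toDigitsCore 10 (m.toNat - 1) (m.toNat / 100) []).length by omega]
  rw [List.drop_left]
  constructor
  · intro h
    have h1 := (List.cons_eq_cons.mp h).1
    have h2 := (List.cons_eq_cons.mp (List.cons_eq_cons.mp h).2).1
    have d1 := (digitChar_eq_zero (m.toNat / 10 % 10) (by omega)).mp h1
    have d2 := (digitChar_eq_zero (m.toNat % 10) (by omega)).mp h2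
    omega
  · intro h
    have d1 : m.toNat / 10 % 10 = 0 := by omega
    have d2 : m.toNat % 10 = 0 := by omega
    rw [d1, d2]
    rfl

-- the loop counts (year - 400) plus one extra for each Gregorian leap year in [400, year-1]
lemma loop_eq (y : Int) (hy : 400 ≤ y) :
    (PySem.List.pyRange 401 (y + 1) 1).foldl
      (fun counter i =>
        if PySem.List.slice (PySem.Int.toChars (i - 1)) (some (-2)) none = ['0', '0'] then
          if PySem.Int.mod (i - 1) 400 = 0 then counter + 2 else counter + 1
        else
          if PySem.Int.mod (i - 1) 4 = 0 then counter + 2 else counter + 1)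
      0
    = (y - 400) +
      (PySem.Int.floordiv (y - 1) 4 - PySem.Int.floordiv (y - 1) 100 + PySem.Int.floordiv (y - 1) 400 - 96) := by
  induction y, hy using Int.le_induction with
  | base =>
    rw [PySem.List.pyRange_one_eq_nil (by omega)]
    decide
  | succ y hy ih =>
    rw [PySem.List.pyRange_one_succ_right (by omega : (401 : Int) ≤ y + 1)]
    rw [List.foldl_append, ih]
    simp only [List.foldl_cons, List.foldl_nil]
    have hsimp : y + 1 - 1 = y := by ring
    simp only [hsimp, cond_iff y (by omega), PySem.Int.mod_eq_zero_iff_dvd]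
    simp only [PySem.Int.floordiv_eq_ediv_of_pos (by omega : (0:Int) < 4),
        PySem.Int.floordiv_eq_ediv_of_pos (by omega : (0:Int) < 100),
        PySem.Int.floordiv_eq_ediv_of_pos (by omega : (0:Int) < 400)]
    split_ifs with h1 h2 h3 <;> omega

-- ===== VERDICT (by name: the statement is the Claim_ definition above) =====
theorem jf_pipeline_spec : Claim_equal_jf_pipeline := by
  intro month day year _
  show jf_pipeline month day year = jf_pipeline_alt month day year
  unfold jf_pipeline jf_pipeline_alt
  by_cases h : (401 : Int) ≤ year
  · simp only [h, if_true]
    rw [loop_eq year (by omega)]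
    ring
  · simp only [h, if_false]
    rw [PySem.List.pyRange_one_eq_nil (by omega)]
    simp
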